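-- pv_equiv track=rewrite | github.com/BaderLab/Transfer-Learning-BNER-Bioinformatics-2018 | code/brat_standoff_corpus_proccessing.py | get_FN_FP_TP
-- ===== SOURCE A (Python) =====
-- def get_FN_FP_TP(predictions, labels):
-- 	"""
-- 	Returns tuple of lists containing false-negatives, false-positives and
-- 	true-positives.
--
-- 	Args:
-- 		predictions: list of entity predictions in brat-standoff format
-- 		labels: list of entity gold standard labels in brat-standoff format
--
-- 	Returns:
-- 		3-tuple of sets, containing FN, FP and TP.
-- 	"""
-- 	# accumulators
-- 	FN = set()
-- 	FP = set()
-- 	TP = set()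
--
-- 	# FN
-- 	for label in labels:
-- 		if not label in predictions:
-- 			FN.add(label)
--
-- 	# FP
-- 	for pred in predictions:
-- 		if not pred in labels:
-- 			FP.add(pred)
--
-- 	# TP
-- 	for pred in predictions:
-- 		if pred in labels:
-- 			TP.add(pred)
--
-- 	return FN, FP, TP
-- ===== SOURCE B (Python) =====
-- def get_FN_FP_TP(predictions, labels):
--     # One dict index: key -> (seen_in_predictions, seen_in_labels), then a single classify pass.
--     flags = {}
--     for pred in predictions:
--         flags[pred] = (True, False)
--     for label in labels:
--         flags[label] = (flags.get(label, (False, False))[0], True)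
--     FN = set()
--     FP = set()
--     TP = set()
--     for key, (in_pred, in_label) in flags.items():
--         if in_pred and in_label:
--             TP.add(key)
--         elif in_pred:
--             FP.add(key)
--         else:
--             FN.add(key)
--     return FN, FP, TP
-- ===== Notes on version B (the rewrite author's own statement) =====
-- stated objective: faster
-- what changed: Replaces the three loops that each do an O(n) list-membership scan with one dict index build (two linear passes setting per-key flags) followed by a single classification pass over the dict items.
import Mathlib
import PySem

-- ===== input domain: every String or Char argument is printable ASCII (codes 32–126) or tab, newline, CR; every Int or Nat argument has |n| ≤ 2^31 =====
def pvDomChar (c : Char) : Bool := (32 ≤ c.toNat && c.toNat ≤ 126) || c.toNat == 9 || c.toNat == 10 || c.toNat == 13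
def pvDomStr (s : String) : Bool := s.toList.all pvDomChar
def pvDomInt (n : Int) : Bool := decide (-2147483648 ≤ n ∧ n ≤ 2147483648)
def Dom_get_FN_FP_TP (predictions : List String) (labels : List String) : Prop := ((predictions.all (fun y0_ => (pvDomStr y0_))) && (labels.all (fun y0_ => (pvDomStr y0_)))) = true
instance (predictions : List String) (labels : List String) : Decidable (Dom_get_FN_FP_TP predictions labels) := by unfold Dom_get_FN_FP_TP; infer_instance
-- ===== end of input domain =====

-- B replaces A's three list-membership-scan loops by one dict index (key -> flag pair) plus a single classification pass; objective: faster.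


-- ===== PORT A =====
def get_FN_FP_TP (predictions : List String) (labels : List String) : List String × List String × List String :=
  let FN : PySem.Set String :=
    labels.foldl (fun FN label => if !(predictions.contains label) then PySem.Set.add FN label else FN) PySem.Set.empty
  let FP : PySem.Set String :=
    predictions.foldl (fun FP pred => if !(labels.contains pred) then PySem.Set.add FP pred else FP) PySem.Set.empty
  let TP : PySem.Set String :=
    predictions.foldl (fun TP pred => if labels.contains pred then PySem.Set.add TP pred else TP) PySem.Set.empty
  (FN, FP, TP)

-- ===== PORT B =====
def get_FN_FP_TP_alt (predictions : List String) (labels : List String) : List String × List String × List String :=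
  let flags0 : PySem.Dict String (Bool × Bool) :=
    predictions.foldl (fun d pred => d.insert pred (true, false)) PySem.Dict.empty
  let flags : PySem.Dict String (Bool × Bool) :=
    labels.foldl (fun d label => d.insert label ((d.getD label (false, false)).1, true)) flags0
  flags.items.foldl
    (fun acc kv =>
      if kv.2.1 && kv.2.2 then (acc.1, acc.2.1, PySem.Set.add acc.2.2 kv.1)
      else if kv.2.1 then (acc.1, PySem.Set.add acc.2.1 kv.1, acc.2.2)
      else (PySem.Set.add acc.1 kv.1, acc.2.1, acc.2.2))
    (PySem.Set.empty, PySem.Set.empty, PySem.Set.empty)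

-- ===== PRECONDITION & SPEC =====
def Spec_get_FN_FP_TP (predictions : List String) (labels : List String) (out : List String × List String × List String) : Prop := out = get_FN_FP_TP_alt predictions labels
instance (predictions : List String) (labels : List String) (out : List String × List String × List String) : Decidable (Spec_get_FN_FP_TP predictions labels out) := by unfold Spec_get_FN_FP_TP; infer_instance

-- ===== CLAIM (what is proved, stated in full; the proofs are below) =====
def Claim_equal_get_FN_FP_TP : Prop := ∀ (predictions : List String) (labels : List String), Dom_get_FN_FP_TP predictions labels → Spec_get_FN_FP_TP predictions labels (get_FN_FP_TP predictions labels)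

-- ===== LEMMAS AND PROOFS =====

-- value of the first index-building loop
theorem d1_getD (l : List String) (d : PySem.Dict String (Bool × Bool)) (k : String) :
    (l.foldl (fun d p => d.insert p (true, false)) d).getD k (false, false)
      = if l.contains k then (true, false) else d.getD k (false, false) := by
  induction l generalizing d with
  | nil => simp
  | cons a t ih =>
    simp only [List.foldl_cons, ih, PySem.Dict.getD_insert, List.contains_cons]
    by_cases hk : k = a <;> by_cases ht : t.contains k
    · simp [hk]
    · simp [hk]
    · simp [hk]
    · simp [hk]

-- value after the second index-building loop: first flag preserved, second set on membership
theorem d2_getD (l : List String) (d : PySem.Dict String (Bool × Bool)) (k : String) :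
    (l.foldl (fun d x => d.insert x ((d.getD x (false, false)).1, true)) d).getD k (false, false)
      = ((d.getD k (false, false)).1, if l.contains k then true else (d.getD k (false, false)).2) := by
  induction l generalizing d with
  | nil => simp
  | cons a t ih =>
    simp only [List.foldl_cons, ih, PySem.Dict.getD_insert, List.contains_cons]
    by_cases hk : k = a <;> by_cases ht : t.contains k
    · simp [hk]
    · simp [hk]
    · simp [hk]
    · simp [hk]

-- filter commutes with Set.add
theorem add_filter (s : PySem.Set String) (x : String) (p : String → Bool) :
    (PySem.Set.add s x).filter p = if p x then PySem.Set.add (List.filter p s) x else s.filter p := by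
  by_cases hx : x ∈ s <;> by_cases hpx : p x = true <;>
    simp [PySem.Set.add, PySem.Set.contains, hx, hpx, List.mem_filter]

-- filter commutes with a Set.add fold
theorem foldl_add_filter (xs : List String) (s : PySem.Set String) (p : String → Bool) :
    (xs.foldl PySem.Set.add s).filter p = (xs.filter p).foldl PySem.Set.add (s.filter p) := by
  induction xs generalizing s with
  | nil => rfl
  | cons a t ih =>
    simp only [List.foldl_cons, ih, List.filter_cons, add_filter]
    by_cases hpa : p a = true <;> simp [hpa]

theorem ofList_filter (xs : List String) (p : String → Bool) :
    (PySem.Set.ofList xs).filter p = PySem.Set.ofList (xs.filter p) := by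
  simp [PySem.Set.ofList_eq_foldl, foldl_add_filter]

-- adding elements already present leaves a set unchanged
theorem foldl_add_of_subset (xs : List String) (s : PySem.Set String) (h : ∀ x ∈ xs, x ∈ s) :
    xs.foldl PySem.Set.add s = s := by
  induction xs with
  | nil => rfl
  | cons a t ih =>
    have ha : PySem.Set.add s a = s := by
      simp [PySem.Set.add, PySem.Set.contains, h a (by simp)]
    simp only [List.foldl_cons, ha]
    exact ih (fun x hx => h x (by simp [hx]))

-- the classification pass over the items of the index
theorem classify_foldl (P L : String → Bool) (K : List String) (a b c : PySem.Set String)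
    (hK : K.Nodup) (ha : ∀ k ∈ K, k ∉ a) (hb : ∀ k ∈ K, k ∉ b) (hc : ∀ k ∈ K, k ∉ c) :
    ((K.map (fun k => (k, (P k, L k)))).foldl
      (fun acc kv =>
        if kv.2.1 && kv.2.2 then (acc.1, acc.2.1, PySem.Set.add acc.2.2 kv.1)
        else if kv.2.1 then (acc.1, PySem.Set.add acc.2.1 kv.1, acc.2.2)
        else (PySem.Set.add acc.1 kv.1, acc.2.1, acc.2.2))
      (a, b, c))
    = (a ++ K.filter (fun k => !P k),
       b ++ K.filter (fun k => P k && !L k),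
       c ++ K.filter (fun k => P k && L k)) := by
  induction K generalizing a b c with
  | nil => simp
  | cons k t ih =>
    have hknt : k ∉ t := (List.nodup_cons.mp hK).1
    have hKt : t.Nodup := (List.nodup_cons.mp hK).2
    have hka : k ∉ a := ha k (by simp)
    have hkb : k ∉ b := hb k (by simp)
    have hkc : k ∉ c := hc k (by simp)
    have hadd : ∀ (s : PySem.Set String), k ∉ s → PySem.Set.add s k = s ++ [k] := by
      intro s hs; simp [PySem.Set.add, PySem.Set.contains, hs]
    have ha' : ∀ x ∈ t, x ∉ a ++ [k] := by
      intro x hx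
      simp only [List.mem_append, List.mem_singleton]
      rintro (h | rfl)
      · exact ha x (by simp [hx]) h
      · exact hknt hx
    have hb' : ∀ x ∈ t, x ∉ b ++ [k] := by
      intro x hx
      simp only [List.mem_append, List.mem_singleton]
      rintro (h | rfl)
      · exact hb x (by simp [hx]) h
      · exact hknt hx
    have hc' : ∀ x ∈ t, x ∉ c ++ [k] := by
      intro x hx
      simp only [List.mem_append, List.mem_singleton]
      rintro (h | rfl)
      · exact hc x (by simp [hx]) h
      · exact hknt hx
    have hta : ∀ x ∈ t, x ∉ a := fun x hx => ha x (by simp [hx])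
    have htb : ∀ x ∈ t, x ∉ b := fun x hx => hb x (by simp [hx])
    have htc : ∀ x ∈ t, x ∉ c := fun x hx => hc x (by simp [hx])
    cases hP : P k <;> cases hL : L k
    · -- k only in neither flag set: FN branch
      simp only [List.map_cons, List.foldl_cons, hP, hL, Bool.and_self,
        Bool.false_eq_true, if_false, hadd a hka]
      rw [ih _ _ _ hKt ha' htb htc]
      simp [hP, hL]
    · simp only [List.map_cons, List.foldl_cons, hP, hL, Bool.false_and,
        Bool.false_eq_true, if_false, hadd a hka]
      rw [ih _ _ _ hKt ha' htb htc]
      simp [hP, hL]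
    · -- only prediction flag: FP branch
      simp only [List.map_cons, List.foldl_cons, hP, hL, Bool.and_false,
        Bool.false_eq_true, if_false, reduceIte, hadd b hkb]
      rw [ih _ _ _ hKt hta hb' htc]
      simp [hP, hL]
    · -- both flags: TP branch
      simp only [List.map_cons, List.foldl_cons, hP, hL, Bool.and_self, reduceIte, hadd c hkc]
      rw [ih _ _ _ hKt hta htb hc']
      simp [hP, hL]

-- three set identities connecting the index's key set to A's filtered scans
theorem fn_eq (predictions labels : List String) :
    (PySem.Set.ofList (predictions ++ labels)).filter (fun k => !predictions.contains k)
      = PySem.Set.ofList (labels.filter (fun k => !predictions.contains k)) := by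
  rw [ofList_filter, List.filter_append]
  have h : predictions.filter (fun k => !predictions.contains k) = [] :=
    List.filter_eq_nil_iff.mpr (fun x hx => by simp [hx])
  rw [h, List.nil_append]

theorem fp_eq (predictions labels : List String) :
    (PySem.Set.ofList (predictions ++ labels)).filter
        (fun k => predictions.contains k && !labels.contains k)
      = PySem.Set.ofList (predictions.filter (fun k => !labels.contains k)) := by
  rw [ofList_filter, List.filter_append]
  have h1 : labels.filter (fun k => predictions.contains k && !labels.contains k) = [] :=
    List.filter_eq_nil_iff.mpr (fun x hx => by simp [hx])
  have h2 : predictions.filter (fun k => predictions.contains k && !labels.contains k)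
      = predictions.filter (fun k => !labels.contains k) :=
    List.filter_congr (fun x hx => by simp [hx])
  rw [h1, h2, List.append_nil]

theorem tp_eq (predictions labels : List String) :
    (PySem.Set.ofList (predictions ++ labels)).filter
        (fun k => predictions.contains k && labels.contains k)
      = PySem.Set.ofList (predictions.filter (fun k => labels.contains k)) := by
  rw [ofList_filter, List.filter_append]
  have h2 : predictions.filter (fun k => predictions.contains k && labels.contains k)
      = predictions.filter (fun k => labels.contains k) :=
    List.filter_congr (fun x hx => by simp [hx])
  rw [h2, PySem.Set.ofList_eq_foldl, List.foldl_append, ← PySem.Set.ofList_eq_foldl]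
  apply foldl_add_of_subset
  intro x hx
  rcases List.mem_filter.mp hx with ⟨hxl, hcond⟩
  have hp : x ∈ predictions := by
    have := (Bool.and_eq_true _ _).mp hcond
    simpa using this.1
  have hl : labels.contains x := ((Bool.and_eq_true _ _).mp hcond).2
  rw [PySem.Set.mem_ofList]
  exact List.mem_filter.mpr ⟨hp, hl⟩

-- ===== VERDICT (by name: the statement is the Claim_ definition above) =====
theorem get_FN_FP_TP_spec : Claim_equal_get_FN_FP_TP := by
  intro predictions labels _
  show get_FN_FP_TP predictions labels = get_FN_FP_TP_alt predictions labels
  simp only [get_FN_FP_TP, get_FN_FP_TP_alt]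
  set d1 := predictions.foldl (fun d pred => d.insert pred (true, false)) PySem.Dict.empty with hd1
  set flags := labels.foldl
      (fun d label => d.insert label ((d.getD label (false, false)).1, true)) d1 with hflags
  have hnd1 : d1.keys.Nodup := by
    rw [hd1]; exact PySem.Dict.nodup_keys_foldl_insert _ _ _ (by simp)
  have hnd : flags.keys.Nodup := by
    rw [hflags]; exact PySem.Dict.nodup_keys_foldl_insert _ _ _ hnd1
  have hkeys : flags.keys = PySem.Set.ofList (predictions ++ labels) := by
    rw [hflags, PySem.Dict.keys_foldl_insert, hd1, PySem.Dict.keys_foldl_insert]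
    simp [PySem.Dict.keys_empty, PySem.Set.update, PySem.Set.ofList_eq_foldl, List.foldl_append]
  have hget : ∀ k, flags.getD k (false, false) = (predictions.contains k, labels.contains k) := by
    intro k
    rw [hflags, d2_getD, hd1, d1_getD]
    by_cases hp : k ∈ predictions <;> by_cases hl : k ∈ labels <;>
      simp [hp, hl, PySem.Dict.getD_empty]
  have hitems : flags.items = (PySem.Set.ofList (predictions ++ labels)).map
      (fun k => (k, (predictions.contains k, labels.contains k))) := by
    rw [PySem.Dict.items_eq_map_keys flags hnd (false, false), hkeys]
    exact List.map_congr_left (fun k _ => by rw [hget])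
  rw [hitems,
    classify_foldl (fun k => predictions.contains k) (fun k => labels.contains k) _ _ _ _
      (hkeys ▸ hnd) (by simp [PySem.Set.empty]) (by simp [PySem.Set.empty]) (by simp [PySem.Set.empty])]
  rw [PySem.List.foldl_if_eq_foldl_filter, PySem.List.foldl_if_eq_foldl_filter,
    PySem.List.foldl_if_eq_foldl_filter]
  simp only [PySem.Set.empty, List.nil_append]
  rw [← PySem.Set.ofList_eq_foldl, ← PySem.Set.ofList_eq_foldl, ← PySem.Set.ofList_eq_foldl,
    fn_eq, fp_eq, tp_eq]
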